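-- pv_equiv track=rewrite | github.com/supern64/customlibs | drawer.py | generate_box
-- ===== SOURCE A (Python) =====
-- template = """________________________________
-- |                              |
-- |                              |
-- |                              |
-- |                              |
-- |                              |
-- |                              |
-- |______________________________|""" # FULL SIZE IS 32x8
--
-- def generate_box(text):
--     """Draws a 28x5 characters text box"""
--     returning_lines = template.split("\n")
--     writing_character = 0
--     brk = 0
--     for (n2, line) in enumerate(returning_lines): # row alignment
--         if n2 >= 2 and n2 <= 6:
--             for (n, char) in enumerate(list(returning_lines[n2])): # column alignment
--                 if n >= 2 and n <= 29:
--                     current_split_line = list(returning_lines[n2])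
--                     try:
--                         current_split_line[n] = text[writing_character]
--                         returning_lines[n2] = "".join(current_split_line)
--                     except IndexError:
--                         brk = 1
--                         break
--                     writing_character = writing_character + 1
--                 else:
--                     continue
--             if brk == 1:
--                 break
--         else:
--             continue
--     writing_character = 0
--     brk = 0
--     current_split_line = []
--     retValue = "\n".join(returning_lines)
--     returning_lines = []
--     return retValue
-- ===== SOURCE B (Python) =====
-- def generate_box(text):
--     """Draws a 28x5 characters text box"""
--     cap = list(text)[:140]
--     rows = ["_" * 32, "|" + " " * 30 + "|"]
--     for i in range(5):
--         seg = cap[28 * i:28 * i + 28]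
--         rows.append("| " + "".join(seg) + " " * (28 - len(seg)) + " |")
--     rows.append("|" + "_" * 30 + "|")
--     return "\n".join(rows)
-- ===== Notes on version B (the rewrite author's own statement) =====
-- stated objective: simpler
-- what changed: B builds the 8 fixed rows of the box directly from 28-character slices of the truncated text (one slice per content row) instead of A's nested enumerate loops that rewrite the template cell by cell with try/except control flow.
import Mathlib
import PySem

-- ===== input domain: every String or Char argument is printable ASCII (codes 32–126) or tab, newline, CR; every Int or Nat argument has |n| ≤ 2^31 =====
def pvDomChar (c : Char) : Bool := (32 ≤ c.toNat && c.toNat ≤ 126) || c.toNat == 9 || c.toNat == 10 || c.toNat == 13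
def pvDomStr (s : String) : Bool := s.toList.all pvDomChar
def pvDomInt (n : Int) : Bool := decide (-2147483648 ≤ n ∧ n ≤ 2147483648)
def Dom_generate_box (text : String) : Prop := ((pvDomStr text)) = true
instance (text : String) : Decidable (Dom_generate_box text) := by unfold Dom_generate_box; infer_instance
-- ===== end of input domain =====

-- B builds the 8 fixed rows of the box directly from 28-character slices of the text
-- (simpler decomposition); A fills the template cell by cell with nested index loops.

-- ===== PORT A =====
-- template.split("\n"): the 8 rows of the 32x8 template, kept as character lists
-- (Python rows are strings; list()/"".join() round-trips make the char list the live value).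
def pvTplRow0 : List Char := List.replicate 32 '_'
def pvTplBlank : List Char := '|' :: (List.replicate 30 ' ' ++ ['|'])
def pvTplBottom : List Char := '|' :: (List.replicate 30 '_' ++ ['|'])
def pvTemplateRows : List (List Char) := [pvTplRow0, pvTplBlank, pvTplBlank, pvTplBlank,
  pvTplBlank, pvTplBlank, pvTplBlank, pvTplBottom]

-- inner loop: for (n, char) in enumerate(list(returning_lines[n2])); state = (line, writing_character);
-- returns (line, writing_character, brk).  text[writing_character] = pyGet?; IndexError ⇒ brk = 1, break.
def pvInnerA (t : List Char) : List (Int × Char) → List Char → Nat → List Char × Nat × Bool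
  | [], line, wc => (line, wc, false)
  | (n, _) :: rest, line, wc =>
    if 2 ≤ n ∧ n ≤ 29 then
      match PySem.List.pyGet? t (wc : Int) with
      | some c => pvInnerA t rest (line.set n.toNat c) (wc + 1)
      | none => (line, wc, true)
    else pvInnerA t rest line wc

-- outer loop: for (n2, line) in enumerate(returning_lines); on brk = 1 the loop breaks
-- and the remaining rows are left unchanged.
def pvOuterA (t : List Char) : List (Int × List Char) → Nat → List (List Char)
  | [], _ => []
  | (n2, row) :: rest, wc =>
    if 2 ≤ n2 ∧ n2 ≤ 6 then
      match pvInnerA t (PySem.List.enumerate row) row wc with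
      | (row', wc', brk) =>
        if brk then row' :: rest.map Prod.snd
        else row' :: pvOuterA t rest wc'
    else row :: pvOuterA t rest wc

def generate_box (text : String) : String :=
  PySem.Str.join "\n"
    ((pvOuterA text.toList (PySem.List.enumerate pvTemplateRows) 0).map String.ofList)

-- ===== PORT B =====
-- cap = list(text)[:140]; rows built directly: for each i in 0..4 the row is
-- "| " + "".join(cap[28*i:28*i+28]) + " "*(28-len(seg)) + " |" (nonnegative slices = drop/take, exact).
def generate_box_alt (text : String) : String :=
  let cap := text.toList.take 140
  let rows : List (List Char) :=
    [List.replicate 32 '_', '|' :: (List.replicate 30 ' ' ++ ['|'])]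
    ++ (List.range 5).map (fun i =>
        let seg := (cap.drop (28 * i)).take 28
        ['|', ' '] ++ (seg ++ (List.replicate (28 - seg.length) ' ' ++ [' ', '|'])))
    ++ ['|' :: (List.replicate 30 '_' ++ ['|'])]
  PySem.Str.join "\n" (rows.map String.ofList)

-- ===== PRECONDITION & SPEC =====
def Spec_generate_box (text : String) (out : String) : Prop := out = generate_box_alt text
instance (text : String) (out : String) : Decidable (Spec_generate_box text out) := by unfold Spec_generate_box; infer_instance

-- ===== CLAIM (what is proved, stated in full; the proofs are below) =====
def Claim_equal_generate_box : Prop := ∀ (text : String), Dom_generate_box text → Spec_generate_box text (generate_box text)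

-- ===== LEMMAS AND PROOFS =====

-- the slice of text written into content row starting at write counter wc
def pvSeg (t : List Char) (wc : Nat) : List Char := (t.drop wc).take 28

-- sequential in-place writes starting at position j (what A's inner loop does to a row)
def pvWriteAll : List Char → Nat → List Char → List Char
  | line, _, [] => line
  | line, j, c :: cs => pvWriteAll (line.set j c) (j + 1) cs

-- a finished content row for a given segment
def pvRowOf (seg : List Char) : List Char :=
  ['|', ' '] ++ (seg ++ (List.replicate (28 - seg.length) ' ' ++ [' ', '|']))

lemma pvSeg_length_le (t : List Char) (wc : Nat) : (pvSeg t wc).length ≤ 28 :=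
  List.length_take_le _ _

lemma pvSeg_nil (t : List Char) (n : Nat) (h : t.length ≤ n) : pvSeg t n = [] := by
  unfold pvSeg
  rw [List.drop_eq_nil_of_le h, List.take_nil]

lemma pvSeg_short (t : List Char) (wc : Nat) (h : (pvSeg t wc).length < 28) :
    t.length < wc + 28 := by
  unfold pvSeg at h
  rw [List.length_take, List.length_drop] at h
  omega

lemma pvInnerA_spec (t : List Char) : ∀ (m : Nat) (ps : List (Int × Char)) (j wc : Nat)
    (line : List Char),
    ps.map Prod.fst = List.map (fun (n : Nat) => (n : Int)) (List.range' j m) → j + m = 32 →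
    pvInnerA t ps line wc =
      (pvWriteAll line (max j 2) ((t.drop wc).take (30 - max j 2)),
       wc + ((t.drop wc).take (30 - max j 2)).length,
       decide (((t.drop wc).take (30 - max j 2)).length < 30 - max j 2)) := by
  intro m
  induction m with
  | zero =>
    intro ps j wc line hmap hj
    have hps : ps = [] := by simpa using hmap
    subst hps
    have hj32 : j = 32 := by omega
    subst hj32
    simp [pvInnerA, pvWriteAll]
  | succ m ih =>
    intro ps j wc line hmap hj
    match ps with
    | [] => rw [List.range'_succ, List.map_cons] at hmap; exact absurd hmap (by simp)
    | (n, c) :: rest =>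
      rw [List.range'_succ, List.map_cons, List.map_cons] at hmap
      injection hmap with hn hrest
      subst hn
      unfold pvInnerA
      by_cases hcond : 2 ≤ ((j : Nat) : Int) ∧ ((j : Nat) : Int) ≤ 29
      · have hj2 : 2 ≤ j := by omega
        have hj29 : j ≤ 29 := by omega
        rw [if_pos hcond]
        rw [PySem.List.pyGet?_natCast, ← List.head?_drop]
        have h1 : max j 2 = j := by omega
        cases hdrop : t.drop wc with
        | nil =>
          simp only [List.head?_nil, h1, pvWriteAll, List.take_nil, List.length_nil,
            Nat.add_zero, Prod.mk.injEq, true_and]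
          have h2 : (0:Nat) < 30 - j := by omega
          simp [h2]
        | cons c' rest' =>
          simp only [List.head?_cons, Int.toNat_natCast]
          have hdrop1 : t.drop (wc + 1) = rest' := by
            rw [← List.tail_drop, hdrop, List.tail_cons]
          rw [ih rest (j + 1) (wc + 1) (line.set j c') hrest (by omega)]
          have h2 : max (j + 1) 2 = j + 1 := by omega
          have h3 : 30 - j = (30 - (j + 1)) + 1 := by omega
          have h4 : pvWriteAll line j (c' :: rest'.take (30 - (j + 1))) =
              pvWriteAll (line.set j c') (j + 1) (rest'.take (30 - (j + 1))) := rfl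
          rw [h1, h2, hdrop1, h3, List.take_succ_cons, h4, List.length_cons]
          simp only [Prod.mk.injEq]
          refine ⟨trivial, by omega, ?_⟩
          simp only [decide_eq_decide]
          omega
      · rw [if_neg hcond]
        rw [ih rest (j + 1) wc line hrest (by omega)]
        have hj' : j ≤ 1 ∨ 30 ≤ j := by
          rcases not_and_or.mp hcond with h | h
          · left; omega
          · right; omega
        rcases hj' with h | h
        · have h1 : max j 2 = 2 := by omega
          have h2 : max (j + 1) 2 = 2 := by omega
          rw [h1, h2]
        · have h1 : 30 - max j 2 = 0 := by omega
          have h2 : 30 - max (j + 1) 2 = 0 := by omega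
          rw [h1, h2]
          simp [pvWriteAll]

lemma pvWriteAll_append : ∀ (seg pre rest : List Char), seg.length ≤ rest.length →
    pvWriteAll (pre ++ rest) pre.length seg = pre ++ (seg ++ rest.drop seg.length) := by
  intro seg
  induction seg with
  | nil => intro pre rest _; simp [pvWriteAll]
  | cons c cs ih =>
    intro pre rest hlen
    cases rest with
    | nil => simp at hlen
    | cons r rs =>
      have hset : (pre ++ r :: rs).set pre.length c = pre ++ c :: rs := by
        rw [List.set_append, if_neg (by omega)]
        simp
      have : pvWriteAll (pre ++ r :: rs) pre.length (c :: cs) =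
          pvWriteAll (pre ++ c :: rs) (pre.length + 1) cs := by
        rw [show pvWriteAll (pre ++ r :: rs) pre.length (c :: cs) =
          pvWriteAll ((pre ++ r :: rs).set pre.length c) (pre.length + 1) cs from rfl, hset]
      rw [this]
      have h2 : pre ++ c :: rs = (pre ++ [c]) ++ rs := by simp
      have h3 : pre.length + 1 = (pre ++ [c]).length := by simp
      rw [h2, h3, ih (pre ++ [c]) rs (by simpa using hlen)]
      simp

lemma pvInnerA_blank (t : List Char) (wc : Nat) :
    pvInnerA t (PySem.List.enumerate pvTplBlank) pvTplBlank wc =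
      (pvRowOf (pvSeg t wc), wc + (pvSeg t wc).length,
       decide ((pvSeg t wc).length < 28)) := by
  rw [pvInnerA_spec t 32 (PySem.List.enumerate pvTplBlank) 0 wc pvTplBlank (by decide) (by decide)]
  have hmax : max 0 2 = 2 := by decide
  rw [hmax]
  have hseg : (t.drop wc).take (30 - 2) = pvSeg t wc := rfl
  rw [hseg]
  have hk : (pvSeg t wc).length ≤ 28 := pvSeg_length_le t wc
  have hblank : pvTplBlank = ['|', ' '] ++ (List.replicate 29 ' ' ++ ['|']) := by decide
  have hwrite : pvWriteAll pvTplBlank 2 (pvSeg t wc) = pvRowOf (pvSeg t wc) := by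
    rw [hblank]
    have := pvWriteAll_append (pvSeg t wc) ['|', ' '] (List.replicate 29 ' ' ++ ['|'])
      (by simp; omega)
    simp only [List.length_cons, List.length_nil] at this
    rw [this]
    unfold pvRowOf
    congr 1
    congr 1
    rw [List.drop_append_of_le_length (by simp; omega), List.drop_replicate]
    have h29 : 29 - (pvSeg t wc).length = (28 - (pvSeg t wc).length) + 1 := by omega
    rw [h29, List.replicate_succ']
    simp
  rw [hwrite]

lemma pvRowOf_nil : pvRowOf [] = pvTplBlank := by decide

lemma pvOuterA_content (t : List Char) : ∀ (k j wc : Nat), 2 ≤ j → j + k = 7 →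
    pvOuterA t (List.map (fun (i : Nat) => ((i : Int), pvTplBlank)) (List.range' j k) ++ [((7 : Int), pvTplBottom)]) wc
      = (List.range k).map (fun i => pvRowOf (pvSeg t (wc + 28 * i))) ++ [pvTplBottom] := by
  intro k
  induction k with
  | zero =>
    intro j wc _ _
    simp [pvOuterA]
  | succ k ih =>
    intro j wc hj2 hj7
    rw [List.range'_succ]
    simp only [List.map_cons, List.cons_append]
    unfold pvOuterA
    rw [if_pos ⟨by exact_mod_cast hj2, by exact_mod_cast (show j ≤ 6 by omega)⟩]
    simp only [pvInnerA_blank]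
    by_cases hbrk : (pvSeg t wc).length < 28
    · rw [if_pos (by simp [hbrk])]
      have hlen : t.length < wc + 28 := pvSeg_short t wc hbrk
      have hmapsnd : List.map Prod.snd
          (List.map (fun (i : Nat) => ((i : Int), pvTplBlank)) (List.range' (j + 1) k)
            ++ [((7 : Int), pvTplBottom)])
          = List.replicate k pvTplBlank ++ [pvTplBottom] := by
        rw [List.map_append, List.map_map]
        simp [Function.comp_def, List.map_const']
      have hRHS : List.map (fun i => pvRowOf (pvSeg t (wc + 28 * i))) (List.range (k + 1))
          = pvRowOf (pvSeg t wc) :: List.replicate k pvTplBlank := by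
        have htail : List.map ((fun i => pvRowOf (pvSeg t (wc + 28 * i))) ∘ Nat.succ)
            (List.range k) = List.replicate k pvTplBlank := by
          rw [List.map_congr_left (g := fun _ => pvTplBlank) (by
            intro i _
            simp only [Function.comp_apply, Nat.succ_eq_add_one]
            rw [pvSeg_nil t _ (by omega)]
            exact pvRowOf_nil)]
          rw [List.map_const', List.length_range]
        rw [List.range_succ_eq_map, List.map_cons, List.map_map, htail]
        norm_num
      rw [hmapsnd, hRHS]
      simp
    · rw [if_neg (by simp [hbrk])]
      have hlen28 : (pvSeg t wc).length = 28 := by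
        have := pvSeg_length_le t wc; omega
      rw [hlen28]
      rw [ih (j + 1) (wc + 28) (by omega) (by omega)]
      have hRHS : List.map (fun i => pvRowOf (pvSeg t (wc + 28 * i))) (List.range (k + 1))
          = pvRowOf (pvSeg t wc) ::
            List.map (fun i => pvRowOf (pvSeg t (wc + 28 + 28 * i))) (List.range k) := by
        have htail : List.map ((fun i => pvRowOf (pvSeg t (wc + 28 * i))) ∘ Nat.succ)
            (List.range k)
            = List.map (fun i => pvRowOf (pvSeg t (wc + 28 + 28 * i))) (List.range k) := by
          apply List.map_congr_left
          intro i _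
          simp only [Function.comp_apply, Nat.succ_eq_add_one]
          congr 2
          omega
        rw [List.range_succ_eq_map, List.map_cons, List.map_map, htail]
        norm_num
      rw [hRHS]
      simp

lemma pvCap_seg (t : List Char) (i : Nat) (hi : i < 5) :
    ((t.take 140).drop (28 * i)).take 28 = pvSeg t (28 * i) := by
  unfold pvSeg
  rw [List.drop_take, List.take_take]
  congr 1
  omega

-- ===== VERDICT (by name: the statement is the Claim_ definition above) =====
theorem generate_box_spec : Claim_equal_generate_box := by
  intro text _
  unfold Spec_generate_box generate_box generate_box_alt
  congr 1
  have henum : PySem.List.enumerate pvTemplateRows =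
      [((0 : Int), pvTplRow0), (1, pvTplBlank)]
      ++ (List.map (fun (i : Nat) => ((i : Int), pvTplBlank)) (List.range' 2 5) ++ [((7 : Int), pvTplBottom)]) := by
    decide
  rw [henum]
  have h01 : pvOuterA text.toList
      ([((0 : Int), pvTplRow0), (1, pvTplBlank)]
        ++ (List.map (fun (i : Nat) => ((i : Int), pvTplBlank)) (List.range' 2 5) ++ [((7 : Int), pvTplBottom)])) 0
      = pvTplRow0 :: pvTplBlank ::
        pvOuterA text.toList
          (List.map (fun (i : Nat) => ((i : Int), pvTplBlank)) (List.range' 2 5) ++ [((7 : Int), pvTplBottom)]) 0 := by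
    simp [pvOuterA]
  rw [h01, pvOuterA_content text.toList 5 2 0 (by omega) (by omega)]
  show (pvTplRow0 :: pvTplBlank ::
      ((List.range 5).map (fun i => pvRowOf (pvSeg text.toList (0 + 28 * i))) ++ [pvTplBottom])).map String.ofList = _
  congr 1
  show pvTplRow0 :: pvTplBlank ::
      ((List.range 5).map (fun i => pvRowOf (pvSeg text.toList (0 + 28 * i))) ++ [pvTplBottom]) = _
  congr 2
  congr 1
  apply List.map_congr_left
  intro i hi
  rw [pvCap_seg text.toList i (List.mem_range.mp hi)]
  simp [pvRowOf]
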